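-- pv_equiv track=rewrite | github.com/nyeonseok/CodingTest | 백준/Silver/17103. 골드바흐 파티션/골드바흐 파티션.py | partition_cnt
-- ===== SOURCE A (Python) =====
-- def partition_cnt(x, table):
--     cnt = 0
--     if table[2] and table[x - 2]:
--         cnt += 1
--     for i in range(3, x//2 + 1, 2):
--         if table[i] and table[x-i]:
--             cnt += 1
--     return cnt
-- ===== SOURCE B (Python) =====
-- def partition_cnt(x, table):
--     return sum(1 for j, pj in enumerate(table)
--                if pj and (j == 2 or (j % 2 == 1 and 3 <= j <= x // 2))
--                and table[x - j])
-- ===== Notes on version B (the rewrite author's own statement) =====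
-- stated objective: simpler
-- what changed: A special-cases the pair (2, x-2) and then runs a stride-2 index loop with an accumulator; B is a single sum-comprehension pass over enumerate(table) with one uniform candidate predicate (j == 2 or odd 3 <= j <= x//2).
import Mathlib
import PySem

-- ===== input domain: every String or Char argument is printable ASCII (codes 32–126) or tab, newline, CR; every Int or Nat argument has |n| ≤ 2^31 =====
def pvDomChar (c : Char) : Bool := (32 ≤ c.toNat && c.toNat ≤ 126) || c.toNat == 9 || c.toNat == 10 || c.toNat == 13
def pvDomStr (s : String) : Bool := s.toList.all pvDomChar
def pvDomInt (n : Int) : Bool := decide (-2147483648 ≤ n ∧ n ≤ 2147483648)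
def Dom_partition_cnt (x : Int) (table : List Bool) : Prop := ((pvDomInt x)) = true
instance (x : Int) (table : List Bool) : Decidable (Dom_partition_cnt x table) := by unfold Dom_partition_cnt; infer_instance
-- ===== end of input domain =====

-- B replaces A's special-cased first pair plus stride-2 index loop with accumulator by a single
-- sum-comprehension pass over enumerate(table) with one uniform candidate predicate (simpler; not faster).

-- ===== PORT A =====
def partition_cnt (x : Int) (table : List Bool) : Int :=
  let cnt : Int := 0
  let cnt := if (PySem.List.pyGetD table 2 false && PySem.List.pyGetD table (x - 2) false) = true
             then cnt + 1 else cnt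
  (PySem.List.pyRange 3 (PySem.Int.floordiv x 2 + 1) 2).foldl
    (fun c i => if (PySem.List.pyGetD table i false && PySem.List.pyGetD table (x - i) false) = true
                then c + 1 else c) cnt

-- ===== PORT B =====
def partition_cnt_alt (x : Int) (table : List Bool) : Int :=
  (PySem.List.enumerate table).foldl
    (fun acc jp =>
      if (jp.2 &&
          ((jp.1 == 2) ||
            (PySem.Int.mod jp.1 2 == 1 && (decide (3 ≤ jp.1) && decide (jp.1 ≤ PySem.Int.floordiv x 2)))) &&
          PySem.List.pyGetD table (x - jp.1) false) = true
      then acc + 1 else acc) 0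

-- ===== PRECONDITION & SPEC =====
-- Pre_ is exactly the inputs on which the Python A returns normally: every index A reads is in
-- range (Python-style, negative indices included); outside it A raises IndexError.
def Pre_partition_cnt (x : Int) (table : List Bool) : Prop :=
  2 < table.length ∧
  (PySem.List.pyGetD table 2 false = true → PySem.Raise.InRange table.length (x - 2)) ∧
  ∀ i ∈ PySem.List.pyRange 3 (PySem.Int.floordiv x 2 + 1) 2,
    i < (table.length : Int) ∧
      (PySem.List.pyGetD table i false = true → PySem.Raise.InRange table.length (x - i))
instance (x : Int) (table : List Bool) : Decidable (Pre_partition_cnt x table) := by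
  unfold Pre_partition_cnt; infer_instance

def pvWitness_partition_cnt : Int × List Bool :=
  (6, [false, false, true, true, false, true, false])

def Spec_partition_cnt (x : Int) (table : List Bool) (out : Int) : Prop := out = partition_cnt_alt x table
instance (x : Int) (table : List Bool) (out : Int) : Decidable (Spec_partition_cnt x table out) := by
  unfold Spec_partition_cnt; infer_instance

-- ===== CLAIM (what is proved, stated in full; the proofs are below) =====
def Claim_equal_partition_cnt : Prop := ∀ (x : Int) (table : List Bool), Dom_partition_cnt x table → Pre_partition_cnt x table → Spec_partition_cnt x table (partition_cnt x table)

-- ===== LEMMAS AND PROOFS =====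

-- Dropping a tail of indices on which the predicate is false does not change a count over a range.
lemma pv_countP_range_ext (p : Nat → Bool) (a b : Nat) (hab : a ≤ b)
    (h : ∀ k, a ≤ k → k < b → p k = false) :
    List.countP p (List.range b) = List.countP p (List.range a) := by
  induction b with
  | zero =>
    have : a = 0 := by omega
    subst this; rfl
  | succ m ih =>
    by_cases hm : a ≤ m
    · rw [List.range_succ, List.countP_append]
      simp [h m hm (by omega), ih hm (fun k hk1 hk2 => h k hk1 (by omega))]
    · have : a = m + 1 := by omega
      subst this; rfl
-- A count over range M of B's uniform candidate predicate splits into the pair at 2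
-- plus the odd positions 3, 5, 7, … — the shape of A's computation.
lemma pv_count_split (q c : Nat → Bool) (M : Nat) (h : 3 ≤ M) :
    List.countP (fun k => (k == 2 || (k % 2 == 1 && decide (3 ≤ k) && c k)) && q k) (List.range M)
      = (if q 2 then 1 else 0)
        + List.countP (fun k => c (3 + 2 * k) && q (3 + 2 * k)) (List.range ((M - 2) / 2)) := by
  induction M with
  | zero => omega
  | succ m ih =>
    rcases Nat.lt_or_ge m 3 with hm | hm
    · have : m = 2 := by omega
      subst this
      simp [List.range_succ, List.countP_cons]
    · rw [List.range_succ, List.countP_append, ih hm]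
      by_cases hodd : m % 2 = 1
      · have hK : (m + 1 - 2) / 2 = (m - 2) / 2 + 1 := by omega
        have h3 : 3 + 2 * ((m - 2) / 2) = m := by omega
        rw [hK, List.range_succ, List.countP_append]
        have hne : (m == 2) = false := by simp; omega
        simp [hodd, h3, hne, show 3 ≤ m from hm]
        try (cases c m <;> cases q m <;> (simp; try omega))
      · have hK : (m + 1 - 2) / 2 = (m - 2) / 2 := by omega
        have hc : ((m == 2 || (m % 2 == 1 && decide (3 ≤ m) && c m)) && q m) = false := by
          simp [hodd]; omega
        rw [hK]
        simp [hc]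

-- ===== VERDICT (by name: the statement is the Claim_ definition above) =====
theorem partition_cnt_spec : Claim_equal_partition_cnt := by
  intro x table _ _
  show partition_cnt x table = partition_cnt_alt x table
  set d := PySem.Int.floordiv x 2 with hd
  set n := table.length with hn
  set q : Nat → Bool :=
    fun k => table.getD k false && PySem.List.pyGetD table (x - (k : Int)) false with hq
  set c : Nat → Bool := fun k => decide ((k : Int) ≤ d) with hc
  set M := max n 3 with hM
  unfold partition_cnt partition_cnt_alt
  rw [PySem.List.pyRange_of_pos 3 (d + 1) (by norm_num)]
  rw [PySem.List.enumerate_eq_map_pyRange table false]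
  rw [show PySem.List.len table = (n : Int) by simp [PySem.List.len, hn]]
  rw [PySem.List.pyRange_one 0 (n : Int)]
  rw [List.foldl_map, List.foldl_map, List.foldl_map]
  rw [PySem.List.foldl_count_if, PySem.List.foldl_count_if]
  rw [← hd]
  rw [show ((n : Int) - 0).toNat = n by omega]
  set K := (if (3:Int) < d + 1 then ((d + 1 - 3 + 2 - 1) / 2).toNat else 0) with hK
  have hB : List.countP
      (fun (y : Nat) =>
        ((0:Int) + ↑y, PySem.List.pyGetD table ((0:Int) + ↑y) false).2 &&
            (((0:Int) + ↑y, PySem.List.pyGetD table ((0:Int) + ↑y) false).1 == 2 ||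
              PySem.Int.mod ((0:Int) + ↑y, PySem.List.pyGetD table ((0:Int) + ↑y) false).1 2 == 1 &&
                (decide (3 ≤ ((0:Int) + ↑y, PySem.List.pyGetD table ((0:Int) + ↑y) false).1) &&
                  decide (((0:Int) + ↑y, PySem.List.pyGetD table ((0:Int) + ↑y) false).1 ≤ d))) &&
          PySem.List.pyGetD table (x - ((0:Int) + ↑y, PySem.List.pyGetD table ((0:Int) + ↑y) false).1) false)
      (List.range n)
      = List.countP (fun k => (k == 2 || (k % 2 == 1 && decide (3 ≤ k) && c k)) && q k)
          (List.range n) := by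
    apply List.countP_congr
    intro k _
    have hmod : PySem.Int.mod ((k : Nat) : Int) 2 = ((k % 2 : Nat) : Int) := PySem.Int.mod_natCast k 2
    simp only [zero_add, hmod, PySem.List.pyGetD_natCast, hq, hc, Bool.and_eq_true,
      Bool.or_eq_true, beq_iff_eq, decide_eq_true_eq]
    cases hA : table.getD k false <;>
      cases hC : PySem.List.pyGetD table (x - (k : Int)) false <;>
        (simp; try omega)
  rw [hB]
  have hext : List.countP (fun k => (k == 2 || (k % 2 == 1 && decide (3 ≤ k) && c k)) && q k)
      (List.range M) = List.countP (fun k => (k == 2 || (k % 2 == 1 && decide (3 ≤ k) && c k)) && q k)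
      (List.range n) :=
    pv_countP_range_ext _ n M (le_max_left n 3) (fun k hk1 _ => by
      have h0 : table[k]? = none := List.getElem?_eq_none (show table.length ≤ k by omega)
      simp [hq, h0])
  rw [← hext, pv_count_split q c M (le_max_right n 3)]
  have hKd : ∀ k : Nat, k < K → 3 + 2 * (k : Int) ≤ d := by
    intro k hk1
    rw [hK] at hk1
    by_cases h3d : (3:Int) < d + 1
    · simp only [if_pos h3d] at hk1; omega
    · simp only [if_neg h3d] at hk1; omega
  have hKd' : ∀ k : Nat, K ≤ k → d < 3 + 2 * (k : Int) := by
    intro k hk1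
    rw [hK] at hk1
    by_cases h3d : (3:Int) < d + 1
    · simp only [if_pos h3d] at hk1; omega
    · simp only [if_neg h3d] at hk1; omega
  have hA1 : List.countP
      (fun (y : Nat) => PySem.List.pyGetD table (3 + 2 * ↑y) false &&
        PySem.List.pyGetD table (x - (3 + 2 * ↑y)) false) (List.range K)
      = List.countP (fun k => c (3 + 2 * k) && q (3 + 2 * k)) (List.range K) := by
    apply List.countP_congr
    intro k hk
    simp only [List.mem_range] at hk
    have hle : 3 + 2 * (k : Int) ≤ d := hKd k hk
    have hg : PySem.List.pyGetD table (3 + 2 * (k : Int)) false = table[3 + 2 * k]?.getD false := by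
      rw [show (3 + 2 * (k : Int)) = ((3 + 2 * k : Nat) : Int) by push_cast; ring,
        PySem.List.pyGetD_natCast, List.getD_eq_getElem?_getD]
    simp [hq, hc, hg, hle]
  have hA2 : List.countP (fun k => c (3 + 2 * k) && q (3 + 2 * k)) (List.range (max K ((M - 2) / 2)))
      = List.countP (fun k => c (3 + 2 * k) && q (3 + 2 * k)) (List.range K) :=
    pv_countP_range_ext _ K (max K ((M - 2) / 2)) (le_max_left _ _) (fun k hk1 _ => by
      have hnot : ¬ (3 + 2 * (k : Int)) ≤ d := by have := hKd' k hk1; omega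
      simp [hc, hnot])
  have hA3 : List.countP (fun k => c (3 + 2 * k) && q (3 + 2 * k)) (List.range (max K ((M - 2) / 2)))
      = List.countP (fun k => c (3 + 2 * k) && q (3 + 2 * k)) (List.range ((M - 2) / 2)) :=
    pv_countP_range_ext _ ((M - 2) / 2) (max K ((M - 2) / 2)) (le_max_right _ _) (fun k hk1 _ => by
      have h0 : table[3 + 2 * k]? = none := List.getElem?_eq_none (show table.length ≤ 3 + 2 * k by omega)
      simp [hq, h0])
  rw [hA1, ← hA2, hA3]
  have hq2 : q 2 = (PySem.List.pyGetD table 2 false && PySem.List.pyGetD table (x - 2) false) := by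
    simp [hq, PySem.List.pyGetD_ofNat' table 2 false]
  rw [hq2]
  split_ifs <;> omega
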